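-- pv_equiv track=rewrite | github.com/royaad/AUB-EECE230X-Computation-and-Programming | Assignment 10/Problem1b_02.py | genBinStr2
-- ===== SOURCE A (Python) =====
-- def genBinStr2(n,w):
--     def genBinStr2Memoized(n,w,tmp):
--         if (n,w) in tmp: return tmp[(n,w)] # check if it already exists and return it
--         if n < 0 or w < 0 or w > n: return [] # inacceptable cases, return empty list
--         if n == 0 and w == 0: return [''] # base case 0: n=0, w=0 -> ['']
--         if n == 1:
--             if w == 0: return["0"] # base case 1: n=1, w=0 -> ['0']
--             if w == 1: return["1"] # base case 2: n=1, w=1 -> ['1']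
--         X = genBinStr2Memoized(n-1,w,tmp)      # will contain the cases with n-1 zeros and w ones. i.e. n=3, w=1 -> ["01", "10"]
--         Y = genBinStr2Memoized(n-1,w-1,tmp)    # will contain the cases with n-1 zeros and w-1 ones. i.e. n=3, w=1 -> ["00"]
--         Z = []
--         if w < n:
--             for s in X:
--                 Z.append("0"+s) # add zero to the start of ["01", "10"] -> ["001", "010"]
--         if w >=1:
--             for m in Y:
--                 Z.append("1"+m) # add one to the start of ["00"] -> ["100"]
--         tmp[(n,w)] = Z
--         return Z
--
--     tmp = {} # create a temporary dictionary to save lists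
--     return genBinStr2Memoized(n,w,tmp) # passing the dictionary to the function makes it faster.
-- ===== SOURCE B (Python) =====
-- def genBinStr2(n, w):
--     # Recurse on the position of the FIRST '1': a valid string is i leading
--     # zeros ('0'*i), then '1', then any length-(n-i-1) string with w-1 ones.
--     # Emitting i from n-w down to 0 yields A's (ascending) order directly.
--     if n < 0 or w < 0 or w > n:
--         return []
--     if w == 0:
--         return ['0' * n]
--     out = []
--     for i in range(n - w, -1, -1):
--         prefix = '0' * i + '1'
--         for s in genBinStr2(n - i - 1, w - 1):
--             out.append(prefix + s)
--     return out
-- ===== Notes on version B (the rewrite author's own statement) =====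
-- stated objective: alternative
-- what changed: Replaces A's memoized first-character recursion (dict of (n,w) subresults, prepending '0'/'1' to shorter strings) by a direct recursion on the position of the first '1': emit '0'*i + '1' for i from n-w down to 0 followed by each string of the (n-i-1, w-1) subproblem, which yields the same ascending order with no memo table; Pre_ excludes exactly the valid inputs (0 <= w <= n) with n >= 999, on which A's n-deep recursion raises RecursionError under CPython's default recursion limit (measured: n=998 returns, n=999 raises).
import Mathlib
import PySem

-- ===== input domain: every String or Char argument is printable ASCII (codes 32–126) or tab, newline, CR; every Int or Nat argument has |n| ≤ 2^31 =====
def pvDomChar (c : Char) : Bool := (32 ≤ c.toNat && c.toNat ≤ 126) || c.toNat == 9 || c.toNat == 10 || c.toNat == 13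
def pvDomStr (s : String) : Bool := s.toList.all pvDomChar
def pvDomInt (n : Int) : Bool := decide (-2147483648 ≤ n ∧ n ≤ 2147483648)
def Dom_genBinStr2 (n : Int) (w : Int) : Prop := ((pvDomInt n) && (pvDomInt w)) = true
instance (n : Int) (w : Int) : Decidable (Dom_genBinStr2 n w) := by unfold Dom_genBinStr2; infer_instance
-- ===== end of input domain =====

-- B replaces A's memoized first-character recursion by a direct recursion on the
-- position of the first '1' (no memo table), emitting results in the same order;
-- objective: alternative.

-- ===== PORT A =====
-- the inner helper genBinStr2Memoized: the mutated dict `tmp` is threaded through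
-- and returned alongside the result (Python mutates it in place).
def genBinStr2Memoized (n : Int) (w : Int)
    (tmp : PySem.Dict (Int × Int) (List String)) :
    List String × PySem.Dict (Int × Int) (List String) :=
  match tmp.get? (n, w) with
  | some v => (v, tmp)                              -- if (n,w) in tmp: return tmp[(n,w)]
  | none =>
    if _h1 : n < 0 ∨ w < 0 ∨ w > n then ([], tmp)
    else if _h2 : n = 0 ∧ w = 0 then ([""], tmp)
    else if _h3 : n = 1 ∧ w = 0 then (["0"], tmp)
    else if _h4 : n = 1 ∧ w = 1 then (["1"], tmp)
    else
      let r1 := genBinStr2Memoized (n - 1) w tmp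
      let X := r1.1
      let r2 := genBinStr2Memoized (n - 1) (w - 1) r1.2
      let Y := r2.1
      let Z : List String := []
      let Z := if w < n then X.foldl (fun z s => z ++ ["0" ++ s]) Z else Z
      let Z := if 1 ≤ w then Y.foldl (fun z m => z ++ ["1" ++ m]) Z else Z
      (Z, r2.2.insert (n, w) Z)
termination_by n.toNat
decreasing_by all_goals omega

def genBinStr2 (n : Int) (w : Int) : List String :=
  (genBinStr2Memoized n w PySem.Dict.empty).1

-- ===== PORT B =====
def genBinStr2_alt (n : Int) (w : Int) : List String :=
  if _h1 : n < 0 ∨ w < 0 ∨ w > n then []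
  else if _h2 : w = 0 then [String.ofList (List.replicate n.toNat '0')]   -- ['0' * n]
  else
    (PySem.List.pyRange (n - w) (-1) (-1)).attach.foldl
      (fun out i =>
        let pre := String.ofList (List.replicate i.1.toNat '0') ++ "1"    -- '0' * i + '1'
        (genBinStr2_alt (n - i.1 - 1) (w - 1)).foldl
          (fun out s => out ++ [pre ++ s]) out)
      []
termination_by n.toNat
decreasing_by
  have hm := i.2
  rw [PySem.List.mem_pyRange_neg_one] at hm
  omega

-- ===== PRECONDITION & SPEC =====
-- Pre_ excludes exactly the valid inputs (0 ≤ w ≤ n) with n ≥ 999: there A's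
-- n-deep recursion raises RecursionError under CPython's default recursion limit
-- (measured boundary: n = 998 returns, n = 999 raises; invalid inputs, which A
-- answers [] without recursing, stay inside Pre_ for every size).
def Pre_genBinStr2 (n : Int) (w : Int) : Prop := n < 0 ∨ w < 0 ∨ w > n ∨ n ≤ 998
instance (n : Int) (w : Int) : Decidable (Pre_genBinStr2 n w) := by unfold Pre_genBinStr2; infer_instance
def pvWitness_genBinStr2 : Int × Int := (4, 2)

def Spec_genBinStr2 (n : Int) (w : Int) (out : List String) : Prop := out = genBinStr2_alt n w
instance (n : Int) (w : Int) (out : List String) : Decidable (Spec_genBinStr2 n w out) := by unfold Spec_genBinStr2; infer_instance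

-- ===== CLAIM (what is proved, stated in full; the proofs are below) =====
def Claim_equal_genBinStr2 : Prop := ∀ (n : Int) (w : Int), Dom_genBinStr2 n w → Pre_genBinStr2 n w → Spec_genBinStr2 n w (genBinStr2 n w)

-- ===== LEMMAS AND PROOFS =====

-- the '0'*i + '1' prefix of B, as a function of the Int i
def pvPref (i : Int) : String := String.ofList (List.replicate i.toNat '0') ++ "1"

theorem pvPref_succ (i : Int) (hi : 0 ≤ i) : "0" ++ pvPref i = pvPref (i + 1) := by
  unfold pvPref
  apply String.ext
  simp only [String.toList_append, String.toList_ofList]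
  rw [show (i + 1).toNat = i.toNat + 1 by omega, List.replicate_succ]
  simp

theorem pvPref_zero : pvPref 0 = "1" := by decide

-- B on invalid inputs
theorem alt_invalid (n w : Int) (h : n < 0 ∨ w < 0 ∨ w > n) : genBinStr2_alt n w = [] := by
  rw [genBinStr2_alt]; simp [h]

-- B with w = 0
theorem alt_zero (n : Int) (h : 0 ≤ n) :
    genBinStr2_alt n 0 = [String.ofList (List.replicate n.toNat '0')] := by
  rw [genBinStr2_alt]
  have hg : ¬ (n < 0 ∨ (0:Int) < 0 ∨ (0:Int) > n) := by omega
  simp only [hg, dite_false, dite_true]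

-- one unfolding of B in the recursive branch, as a flatMap over the countdown range
theorem alt_flatMap (n w : Int) (hg : ¬ (n < 0 ∨ w < 0 ∨ w > n)) (hw : w ≠ 0) :
    genBinStr2_alt n w =
      (PySem.List.pyRange (n - w) (-1) (-1)).flatMap
        (fun i => (genBinStr2_alt (n - i - 1) (w - 1)).map (fun s => pvPref i ++ s)) := by
  rw [genBinStr2_alt]
  simp only [hg, hw, dite_false]
  have hfun : (fun (out : List String) (i : Int) =>
      (genBinStr2_alt (n - i - 1) (w - 1)).foldl
        (fun out s => out ++ [String.ofList (List.replicate i.toNat '0') ++ "1" ++ s]) out)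
    = (fun (out : List String) (i : Int) =>
        out ++ ((genBinStr2_alt (n - i - 1) (w - 1)).map (fun s => pvPref i ++ s))) := by
    funext out i
    rw [PySem.List.foldl_append_singleton_eq_map]
    simp [pvPref, String.append_assoc]
  rw [List.foldl_attach
    (f := fun (out : List String) (i : Int) =>
      (genBinStr2_alt (n - i - 1) (w - 1)).foldl
        (fun out s => out ++ [String.ofList (List.replicate i.toNat '0') ++ "1" ++ s]) out)]
  rw [hfun, PySem.List.foldl_append_eq_flatMap]
  simp

-- the countdown range [a, ..., 0] splits into shifted [a-1, ..., 0] and the final 0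
theorem pyRange_countdown_split (a : Int) (ha : 1 ≤ a) :
    PySem.List.pyRange a (-1) (-1) =
      ((PySem.List.pyRange (a - 1) (-1) (-1)).map (fun j => j + 1)) ++ [0] := by
  rw [PySem.List.pyRange_neg_one, PySem.List.pyRange_neg_one]
  rw [show (a - -1).toNat = a.toNat + 1 by omega, List.range_succ]
  rw [show (a - 1 - -1).toNat = a.toNat by omega]
  simp only [List.map_append, List.map_map, List.map_cons, List.map_nil]
  refine congrArg₂ _ (List.map_congr_left ?_) ?_
  · intro k _
    simp only [Function.comp_apply]
    ring
  · simp only [List.cons.injEq, and_true]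
    omega

-- B satisfies A's recurrence
theorem alt_rec (n w : Int) (hn : 1 ≤ n) (hw : 1 ≤ w) (hwn : w ≤ n) :
    genBinStr2_alt n w =
      (genBinStr2_alt (n - 1) w).map (fun s => "0" ++ s) ++
      (genBinStr2_alt (n - 1) (w - 1)).map (fun s => "1" ++ s) := by
  have hg : ¬ (n < 0 ∨ w < 0 ∨ w > n) := by omega
  rw [alt_flatMap n w hg (by omega)]
  by_cases ha : w = n
  · -- n - w = 0: a single term i = 0; the "0"-prefixed block is empty
    subst ha
    rw [alt_invalid (w - 1) w (by omega)]
    have h0 : PySem.List.pyRange (w - w) (-1) (-1) = [0] := by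
      rw [PySem.List.pyRange_neg_one]
      simp [List.range_succ]
    rw [h0]
    simp [pvPref_zero]
  · -- n - w ≥ 1
    have hg' : ¬ (n - 1 < 0 ∨ w < 0 ∨ w > n - 1) := by omega
    rw [alt_flatMap (n - 1) w hg' (by omega)]
    rw [show n - w = (n - 1 - w) + 1 by ring, pyRange_countdown_split ((n - 1 - w) + 1) (by omega)]
    rw [show (n - 1 - w) + 1 - 1 = n - 1 - w by ring]
    rw [List.flatMap_append, List.flatMap_map, List.map_flatMap]
    congr 1
    · -- shifted terms i = j + 1 match the "0"-prefixed block
      refine List.flatMap_congr ?_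
      intro j hj
      rw [PySem.List.mem_pyRange_neg_one] at hj
      simp only [List.map_map]
      rw [show n - (j + 1) - 1 = n - 1 - j - 1 by ring]
      congr 1
      funext s
      simp only [Function.comp_apply]
      rw [← String.append_assoc, pvPref_succ j (by omega)]
    · -- the final term i = 0 is the "1"-prefixed block
      simp [pvPref_zero]

-- coherence of the memo table with B
def pvCoh (tmp : PySem.Dict (Int × Int) (List String)) : Prop :=
  ∀ a b v, tmp.get? (a, b) = some v → v = genBinStr2_alt a b

-- the loop body of A's recursive case equals B, given correct sub-results
theorem pvZ_eq (n w : Int) (hn : 2 ≤ n) (hw0 : 0 ≤ w) (hwn : w ≤ n) (X Y : List String)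
    (hX : X = genBinStr2_alt (n - 1) w) (hY : Y = genBinStr2_alt (n - 1) (w - 1)) :
    (if 1 ≤ w then
        Y.foldl (fun z m => z ++ ["1" ++ m])
          (if w < n then X.foldl (fun z s => z ++ ["0" ++ s]) ([] : List String) else [])
      else if w < n then X.foldl (fun z s => z ++ ["0" ++ s]) ([] : List String) else []) =
    genBinStr2_alt n w := by
  subst hX; subst hY
  simp only [PySem.List.foldl_append_singleton_eq_map, List.nil_append]
  by_cases hw1 : 1 ≤ w
  · by_cases hwn' : w < n
    · simp only [hw1, hwn', if_true]
      rw [alt_rec n w (by omega) hw1 (by omega)]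
    · have hwe : w = n := by omega
      simp only [hw1, hwn', if_true, if_false]
      rw [alt_rec n w (by omega) hw1 (by omega), hwe,
        alt_invalid (n - 1) n (by omega)]
      simp
  · have hw00 : w = 0 := by omega
    subst hw00
    simp only [hw1, if_false, show (0:Int) < n by omega, if_true]
    rw [alt_zero (n - 1) (by omega), alt_zero n (by omega)]
    simp only [List.map_cons, List.map_nil, List.cons.injEq, and_true]
    apply String.ext
    simp only [String.toList_append, String.toList_ofList]
    rw [show n.toNat = (n - 1).toNat + 1 by omega, List.replicate_succ]
    simp

theorem memo_spec (N : Nat) :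
    ∀ (n w : Int) (tmp : PySem.Dict (Int × Int) (List String)),
      n.toNat ≤ N → pvCoh tmp →
      (genBinStr2Memoized n w tmp).1 = genBinStr2_alt n w ∧
      pvCoh (genBinStr2Memoized n w tmp).2 := by
  induction N with
  | zero =>
    intro n w tmp hN hcoh
    rw [genBinStr2Memoized]
    cases hget : tmp.get? (n, w) with
    | some v => exact ⟨hcoh n w v hget, hcoh⟩
    | none =>
      dsimp only
      by_cases h1 : n < 0 ∨ w < 0 ∨ w > n
      · rw [dif_pos h1]; exact ⟨(alt_invalid n w h1).symm, hcoh⟩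
      · rw [dif_neg h1]
        have h2 : n = 0 ∧ w = 0 := by constructor <;> omega
        rw [dif_pos h2]
        obtain ⟨hn0, hw0⟩ := h2; subst hn0; subst hw0
        refine ⟨?_, hcoh⟩
        rw [alt_zero 0 le_rfl]
        rfl
  | succ N ih =>
    intro n w tmp hN hcoh
    rw [genBinStr2Memoized]
    cases hget : tmp.get? (n, w) with
    | some v => exact ⟨hcoh n w v hget, hcoh⟩
    | none =>
      dsimp only
      by_cases h1 : n < 0 ∨ w < 0 ∨ w > n
      · rw [dif_pos h1]; exact ⟨(alt_invalid n w h1).symm, hcoh⟩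
      · rw [dif_neg h1]
        by_cases h2 : n = 0 ∧ w = 0
        · rw [dif_pos h2]
          obtain ⟨hn0, hw0⟩ := h2; subst hn0; subst hw0
          refine ⟨?_, hcoh⟩
          rw [alt_zero 0 le_rfl]
          rfl
        · rw [dif_neg h2]
          by_cases h3 : n = 1 ∧ w = 0
          · rw [dif_pos h3]
            obtain ⟨hn0, hw0⟩ := h3; subst hn0; subst hw0
            refine ⟨?_, hcoh⟩
            rw [alt_zero 1 (by omega)]
            rfl
          · rw [dif_neg h3]
            by_cases h4 : n = 1 ∧ w = 1
            · rw [dif_pos h4]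
              obtain ⟨hn0, hw0⟩ := h4; subst hn0; subst hw0
              refine ⟨?_, hcoh⟩
              rw [alt_rec 1 1 le_rfl le_rfl le_rfl,
                show (1:Int) - 1 = 0 by omega,
                alt_invalid 0 1 (by omega), alt_zero 0 le_rfl]
              rfl
            · rw [dif_neg h4]
              -- recursive case: n ≥ 2, 0 ≤ w ≤ n
              have hn2 : 2 ≤ n := by omega
              obtain ⟨hX, hcoh1⟩ := ih (n - 1) w tmp (by omega) hcoh
              obtain ⟨hY, hcoh2⟩ :=
                ih (n - 1) (w - 1) (genBinStr2Memoized (n - 1) w tmp).2 (by omega) hcoh1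
              have hkey := pvZ_eq n w hn2 (by omega) (by omega)
                (genBinStr2Memoized (n - 1) w tmp).1
                (genBinStr2Memoized (n - 1) (w - 1) (genBinStr2Memoized (n - 1) w tmp).2).1 hX hY
              refine ⟨hkey, ?_⟩
              intro a b v hv
              by_cases hab : (a, b) = (n, w)
              · rw [hab, PySem.Dict.get?_insert_self] at hv
                obtain ⟨ha, hb⟩ := Prod.mk.injEq .. ▸ hab
                subst ha; subst hb
                cases hv
                exact hkey
              · rw [PySem.Dict.get?_insert_of_ne _ _ hab] at hv
                exact hcoh2 a b v hv

-- ===== VERDICT (by name: the statement is the Claim_ definition above) =====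
theorem genBinStr2_spec : Claim_equal_genBinStr2 := by
  intro n w _ _
  unfold Spec_genBinStr2 genBinStr2
  exact (memo_spec n.toNat n w PySem.Dict.empty le_rfl
    (by intro a b v hv; rw [PySem.Dict.get?_empty] at hv; cases hv)).1
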